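-- pv_equiv track=rewrite | github.com/mahbub-hasan/kr-game | Gappy-Data/create_new_instances.py | get_full_hints
-- ===== SOURCE A (Python) =====
-- def get_full_hints(sol : list):
--     size = len(sol)
--     hints = []                  # first column then row hints
--     for i in range(0,size*2):
--         hints.append(-1)
--
--     r = 0
--     c = 0
--     for row in sol:
--         for element in row:
--             if element:
--                 # update hint for column
--                 if(hints[c+size] == -1):
--                     hints[c+size] = r
--                 else:
--                     hints[c+size] = r-hints[c+size]-1
--                 # update hint for row
--                 if(hints[r] == -1):
--                     hints[r] = c
--                 else:
--                     hints[r] = c-hints[r]-1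
--             c +=1
--         r += 1
--         c = 0
--
--     return hints
-- ===== SOURCE B (Python) =====
-- def _line_hint(line):
--     h = -1
--     for i, e in enumerate(line):
--         if e:
--             h = i if h == -1 else i - h - 1
--     return h
--
-- def get_full_hints(sol : list):
--     size = len(sol)
--     cols = [[row[c] if c < len(row) else 0 for row in sol] for c in range(size)]
--     return [_line_hint(row) for row in sol] + [_line_hint(col) for col in cols]
-- ===== Notes on version B (the rewrite author's own statement) =====
-- stated objective: simpler
-- what changed: A fills a single mutable 2*size hints list in one interleaved cell-by-cell pass updating row and column slots together; B factors the 'first hit stores its index, later hits fold to index-prev-1' recurrence into one _line_hint helper and applies it independently to each row and to each zero-padded column, concatenating the two results.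
import Mathlib
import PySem

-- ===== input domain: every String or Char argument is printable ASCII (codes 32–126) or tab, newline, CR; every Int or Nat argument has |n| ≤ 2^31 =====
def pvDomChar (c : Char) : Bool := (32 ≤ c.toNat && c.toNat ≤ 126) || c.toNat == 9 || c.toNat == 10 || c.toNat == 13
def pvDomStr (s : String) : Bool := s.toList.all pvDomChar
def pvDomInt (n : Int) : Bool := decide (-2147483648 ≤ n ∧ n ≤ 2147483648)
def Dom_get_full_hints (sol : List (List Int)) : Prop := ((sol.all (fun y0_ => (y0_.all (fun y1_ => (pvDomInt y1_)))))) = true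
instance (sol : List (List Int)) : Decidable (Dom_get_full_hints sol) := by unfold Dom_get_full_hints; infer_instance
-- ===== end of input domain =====

-- B replaces A's single interleaved cell-by-cell pass (mutating a shared 2*size hints
-- list) by one shared line-fold helper applied to each row and to each zero-padded
-- column; objective: simpler.

-- ===== PORT A =====
-- inner loop body: 'for element in row: …' with state (hints, c)
def pvAInner (size r : Int) (st : List Int × Int) (element : Int) : List Int × Int :=
  let hints := st.1
  let c := st.2
  let hints :=
    if element ≠ 0 then
      -- update hint for column
      let hints :=
        if PySem.List.pyGetD hints (c + size) 0 = -1 then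
          PySem.List.pySetD hints (c + size) r
        else
          PySem.List.pySetD hints (c + size) (r - PySem.List.pyGetD hints (c + size) 0 - 1)
      -- update hint for row
      if PySem.List.pyGetD hints r 0 = -1 then
        PySem.List.pySetD hints r c
      else
        PySem.List.pySetD hints r (c - PySem.List.pyGetD hints r 0 - 1)
    else hints
  (hints, c + 1)

-- outer loop body: 'for row in sol: …' with state (hints, r); c is reset to 0 per row
def pvAOuter (size : Int) (st : List Int × Int) (row : List Int) : List Int × Int :=
  ((row.foldl (pvAInner size st.2) (st.1, 0)).1, st.2 + 1)

def get_full_hints (sol : List (List Int)) : List Int :=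
  let size : Int := (sol.length : Int)
  let hints : List Int :=
    (PySem.List.pyRange 0 (2 * size) 1).foldl (fun h _ => h ++ [(-1 : Int)]) []
  (sol.foldl (pvAOuter size) (hints, 0)).1

-- ===== PORT B =====
-- _line_hint: fold 'first hit stores index, later hits i - h - 1' over one line
def pvLineHint (line : List Int) : Int :=
  (PySem.List.enumerate line 0).foldl
    (fun h p => if p.2 ≠ 0 then (if h = -1 then p.1 else p.1 - h - 1) else h) (-1)

def get_full_hints_alt (sol : List (List Int)) : List Int :=
  let size : Int := (sol.length : Int)
  let cols := (PySem.List.pyRange 0 size 1).map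
    (fun c => sol.map (fun row =>
      if c < (row.length : Int) then PySem.List.pyGetD row c 0 else 0))
  sol.map pvLineHint ++ cols.map pvLineHint

-- ===== PRECONDITION & SPEC =====
-- Pre_ excludes exactly the inputs where A raises IndexError: a nonzero ("truthy")
-- cell in some row at a column index ≥ len(sol) makes A index hints[c+size] out of range.
def Pre_get_full_hints (sol : List (List Int)) : Prop :=
  (sol.all (fun row => (row.drop sol.length).all (fun e => e == 0))) = true
instance (sol : List (List Int)) : Decidable (Pre_get_full_hints sol) := by
  unfold Pre_get_full_hints; infer_instance

def pvWitness_get_full_hints : List (List Int) := [[1, 0], [0, 1]]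


def Spec_get_full_hints (sol : List (List Int)) (out : List Int) : Prop :=
  out = get_full_hints_alt sol
instance (sol : List (List Int)) (out : List Int) : Decidable (Spec_get_full_hints sol out) := by
  unfold Spec_get_full_hints; infer_instance

-- ===== CLAIM (what is proved, stated in full; the proofs are below) =====
def Claim_equal_get_full_hints : Prop :=
  ∀ (sol : List (List Int)), Dom_get_full_hints sol → Pre_get_full_hints sol →
    Spec_get_full_hints sol (get_full_hints sol)

-- ===== LEMMAS AND PROOFS =====

def pvHintFold (h i : Int) : Int := if h = -1 then i else i - h - 1

def pvRowAcc : List Int → Nat → Int → Int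
  | [], _, h => h
  | e :: row, c0, h => pvRowAcc row (c0 + 1) (if e ≠ 0 then pvHintFold h (c0 : Int) else h)

def pvColUpd : List Int → Nat → Nat → List Int → List Int
  | [], _, _, ch => ch
  | e :: row, r, c0, ch =>
      pvColUpd row r (c0 + 1)
        (if e ≠ 0 then ch.set c0 (pvHintFold (ch.getD c0 0) (r : Int)) else ch)

def pvColsUpd : List (List Int) → Nat → List Int → List Int
  | [], _, ch => ch
  | row :: rs, r, ch => pvColsUpd rs (r + 1) (pvColUpd row r 0 ch)

lemma pv_init_fold (l : List Int) (init : List Int) :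
    l.foldl (fun h _ => h ++ [(-1 : Int)]) init = init ++ List.replicate l.length (-1) := by
  induction l generalizing init with
  | nil => simp
  | cons x l ih => simp [ih, List.replicate_succ]

lemma pv_colUpd_length (row : List Int) :
    ∀ (r c0 : Nat) (ch : List Int), (pvColUpd row r c0 ch).length = ch.length := by
  induction row with
  | nil => intro r c0 ch; simp [pvColUpd]
  | cons e row ih => intro r c0 ch; simp [pvColUpd, ih]; split <;> simp

lemma pv_colsUpd_length (rs : List (List Int)) :
    ∀ (r : Nat) (ch : List Int), (pvColsUpd rs r ch).length = ch.length := by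
  induction rs with
  | nil => intro r ch; simp [pvColsUpd]
  | cons row rs ih => intro r ch; simp [pvColsUpd, ih, pv_colUpd_length]

lemma pv_take_set (xs : List Int) : ∀ (r : Nat) (v : Int), r < xs.length →
    (xs.set r v).take (r + 1) = xs.take r ++ [v] := by
  induction xs with
  | nil => intro r v h; simp at h
  | cons x xs ih =>
    intro r v h
    cases r with
    | zero => simp
    | succ r => simp [ih r v (by simpa using h)]

lemma pv_inner (n : Nat) (r : Nat) (row : List Int) :
    ∀ (c0 : Nat) (RH CH : List Int), RH.length = n → CH.length = n → r < n →
    (∀ k, (hk : k < row.length) → row[k] ≠ 0 → c0 + k < n) →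
    row.foldl (pvAInner (n : Int) (r : Int)) (RH ++ CH, (c0 : Int)) =
      (RH.set r (pvRowAcc row c0 (RH.getD r 0)) ++ pvColUpd row r c0 CH,
       (c0 : Int) + row.length) := by
  induction row with
  | nil =>
    intro c0 RH CH hRH hCH hr _
    simp only [List.foldl_nil, pvRowAcc, pvColUpd]
    rw [List.getD_eq_getElem RH 0 (by omega), List.set_getElem_self]
    simp
  | cons e row ih =>
    intro c0 RH CH hRH hCH hr hPre
    by_cases he : e = 0
    · -- falsy element: only c advances
      have step : pvAInner (n : Int) (r : Int) (RH ++ CH, (c0 : Int)) e = (RH ++ CH, (c0 : Int) + 1) := by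
        simp [pvAInner, he]
      rw [List.foldl_cons, step]
      have hc : ((c0 : Int) + 1) = ((c0 + 1 : Nat) : Int) := by push_cast; ring
      rw [hc, ih (c0+1) RH CH hRH hCH hr (fun k hk hne => by
        have := hPre (k+1) (by simpa using Nat.succ_lt_succ hk) (by simpa using hne)
        omega)]
      simp [pvRowAcc, pvColUpd, he]
      push_cast; ring
    · -- truthy element
      have hc0 : c0 < n := by have := hPre 0 (by simp) (by simpa using he); simpa using this
      have hgetCol : PySem.List.pyGetD (RH ++ CH) ((c0 : Int) + (n : Int)) 0 = CH.getD c0 0 := by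
        have : ((c0 : Int) + (n : Int)) = ((c0 + n : Nat) : Int) := by push_cast; ring
        rw [this, PySem.List.pyGetD_natCast]
        simp [List.getD, List.getElem?_append_right (by omega : RH.length ≤ c0 + n), hRH,
          Nat.add_sub_cancel]
      have hsetCol : ∀ v, PySem.List.pySetD (RH ++ CH) ((c0 : Int) + (n : Int)) v
          = RH ++ CH.set c0 v := by
        intro v
        have : ((c0 : Int) + (n : Int)) = ((c0 + n : Nat) : Int) := by push_cast; ring
        rw [this, PySem.List.pySetD_natCast]
        rw [List.set_append]
        simp [hRH]
      have hgetRow : ∀ (CH' : List Int), PySem.List.pyGetD (RH ++ CH') ((r : Nat) : Int) 0 = RH.getD r 0 := by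
        intro CH'
        rw [PySem.List.pyGetD_natCast]
        simp [List.getD, List.getElem?_append_left (by omega : r < RH.length)]
      have hsetRow : ∀ (CH' : List Int) (v : Int), PySem.List.pySetD (RH ++ CH') ((r : Nat) : Int) v
          = RH.set r v ++ CH' := by
        intro CH' v
        rw [PySem.List.pySetD_natCast, List.set_append]
        simp [hRH, hr]
      set CH2 := CH.set c0 (pvHintFold (CH.getD c0 0) (r : Int)) with hCH2
      have hA : ∀ (CH' : List Int), (RH ++ CH')[r]?.getD 0 = RH[r]?.getD (0:Int) := by
        intro CH'
        rw [List.getElem?_append_left (by omega : r < RH.length)]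
      have hB : ∀ (CH' : List Int) (v : Int), (RH ++ CH').set r v = RH.set r v ++ CH' := by
        intro CH' v
        rw [List.set_append]
        simp [hRH, hr]
      have step : pvAInner (n : Int) (r : Int) (RH ++ CH, (c0 : Int)) e
          = (RH.set r (pvHintFold (RH.getD r 0) (c0 : Int)) ++ CH2, (c0 : Int) + 1) := by
        by_cases hv : CH[c0]?.getD (0:Int) = -1 <;> by_cases hw : RH[r]?.getD (0:Int) = -1 <;>
          simp [pvAInner, he, hgetCol, hsetCol, hA, hB, hv, hw, pvHintFold, hCH2, List.getD]
      rw [List.foldl_cons, step]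
      have hc : ((c0 : Int) + 1) = ((c0 + 1 : Nat) : Int) := by push_cast; ring
      rw [hc, ih (c0+1) (RH.set r (pvHintFold (RH.getD r 0) (c0 : Int))) CH2
        (by simp [hRH]) (by simp [hCH2, hCH]) hr
        (fun k hk hne => by
          have := hPre (k+1) (by simpa using Nat.succ_lt_succ hk) (by simpa using hne)
          omega)]
      have hgd : (RH.set r (pvHintFold (RH.getD r 0) (c0 : Int))).getD r 0
          = pvHintFold (RH.getD r 0) (c0 : Int) := by
        simp [List.getD, List.getElem?_set_self, hRH, hr]
      rw [hgd, List.set_set]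
      simp only [pvRowAcc, pvColUpd, hCH2]
      rw [if_pos he, if_pos he]
      congr 1
      push_cast [List.length_cons]
      ring

lemma pv_outer (n : Nat) (rs : List (List Int)) :
    ∀ (r : Nat) (RH CH : List Int), RH.length = n → CH.length = n →
    r + rs.length ≤ n →
    (∀ j, r ≤ j → j < n → RH.getD j 0 = -1) →
    (∀ row ∈ rs, ∀ k, (hk : k < row.length) → row[k] ≠ 0 → k < n) →
    rs.foldl (pvAOuter (n : Int)) (RH ++ CH, (r : Int)) =
      (RH.take r ++ rs.map (fun row => pvRowAcc row 0 (-1)) ++ RH.drop (r + rs.length)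
         ++ pvColsUpd rs r CH,
       (r : Int) + rs.length) := by
  induction rs with
  | nil =>
    intro r RH CH hRH hCH hle hinv hPre
    simp [pvColsUpd]
  | cons row rs ih =>
    intro r RH CH hRH hCH hle hinv hPre
    have hr : r < n := by simp at hle; omega
    have step : pvAOuter (n : Int) (RH ++ CH, (r : Int)) row
        = (RH.set r (pvRowAcc row 0 (-1)) ++ pvColUpd row r 0 CH, (r : Int) + 1) := by
      unfold pvAOuter
      have h0 : ((RH ++ CH, (r : Int)).1, (0 : Int)) = (RH ++ CH, ((0 : Nat) : Int)) := by simp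
      rw [h0]
      show ((List.foldl (pvAInner ↑n (↑r)) (RH ++ CH, ((0:Nat) : Int)) row).1, _) = _
      rw [pv_inner n r row 0 RH CH hRH hCH hr
        (fun k hk hne => by simpa using hPre row (by simp) k hk hne)]
      rw [hinv r le_rfl hr]
    rw [List.foldl_cons, step]
    have hc : ((r : Int) + 1) = ((r + 1 : Nat) : Int) := by push_cast; ring
    rw [hc, ih (r + 1) (RH.set r (pvRowAcc row 0 (-1))) (pvColUpd row r 0 CH)
      (by simp [hRH]) (by simp [pv_colUpd_length, hCH])
      (by simp at hle ⊢; omega)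
      (fun j hj hjn => by
        have : r ≠ j := by omega
        simp [List.getD, List.getElem?_set_ne this]
        have h2 := hinv j (by omega) hjn
        simpa [List.getD] using h2)
      (fun row' hm k hk hne => hPre row' (by simp [hm]) k hk hne)]
    congr 1
    · rw [pv_take_set RH r _ (by omega), List.drop_set_of_lt (l := RH) (by omega : r < r + 1 + rs.length)]
      simp [pvColsUpd, List.append_assoc]
      omega
    · push_cast [List.length_cons]; ring

lemma pv_colUpd_getD (r : Nat) (row : List Int) :
    ∀ (c0 : Nat) (CH : List Int) (j : Nat),
    (∀ k, (hk : k < row.length) → row[k] ≠ 0 → c0 + k < CH.length) →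
    (pvColUpd row r c0 CH).getD j 0 =
      if c0 ≤ j ∧ row.getD (j - c0) 0 ≠ 0 then pvHintFold (CH.getD j 0) (r : Int)
      else CH.getD j 0 := by
  induction row with
  | nil =>
    intro c0 CH j _
    simp [pvColUpd, List.getD]
  | cons e row ih =>
    intro c0 CH j hPre
    by_cases he : e = 0
    · rw [show pvColUpd (e :: row) r c0 CH = pvColUpd row r (c0+1) CH by simp [pvColUpd, he]]
      rw [ih (c0+1) CH j (fun k hk hne => by
        have := hPre (k+1) (by simpa using Nat.succ_lt_succ hk) (by simpa using hne)
        omega)]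
      by_cases hj : c0 ≤ j
      · by_cases hj1 : c0 + 1 ≤ j
        · have : (e :: row).getD (j - c0) 0 = row.getD (j - (c0+1)) 0 := by
            have : j - c0 = (j - (c0+1)) + 1 := by omega
            simp [this]
          rw [this]
          simp [hj, hj1]
        · -- j = c0
          have hjc : j = c0 := by omega
          simp [hjc, he]
      · simp [hj, (show ¬ c0 + 1 ≤ j by omega)]
    · have hc0 : c0 < CH.length := by
        have := hPre 0 (by simp) (by simpa using he); simpa using this
      rw [show pvColUpd (e :: row) r c0 CH
          = pvColUpd row r (c0+1) (CH.set c0 (pvHintFold (CH.getD c0 0) (r : Int)))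
          by simp [pvColUpd, he]]
      rw [ih (c0+1) _ j (fun k hk hne => by
        have := hPre (k+1) (by simpa using Nat.succ_lt_succ hk) (by simpa using hne)
        simpa using (by omega : c0 + 1 + k < CH.length))]
      by_cases hj1 : c0 + 1 ≤ j
      · have hne : c0 ≠ j := by omega
        have hset : (CH.set c0 (pvHintFold (CH.getD c0 0) (r : Int))).getD j 0 = CH.getD j 0 := by
          simp [List.getD, List.getElem?_set_ne hne]
        rw [hset]
        have : (e :: row).getD (j - c0) 0 = row.getD (j - (c0+1)) 0 := by
          have : j - c0 = (j - (c0+1)) + 1 := by omega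
          simp [this]
        rw [this]
        simp [(show c0 ≤ j by omega), hj1]
      · by_cases hj : c0 ≤ j
        · have hjc : j = c0 := by omega
          have hset : (CH.set c0 (pvHintFold (CH.getD c0 0) (r : Int))).getD c0 0
              = pvHintFold (CH.getD c0 0) (r : Int) := by
            simp [List.getD, hc0]
          subst hjc
          rw [if_neg (fun h => hj1 h.1), hset,
            if_pos ⟨le_rfl, by simp [Nat.sub_self, List.getD_cons_zero, he]⟩]
        · have hne : c0 ≠ j := by omega
          have hset : (CH.set c0 (pvHintFold (CH.getD c0 0) (r : Int))).getD j 0 = CH.getD j 0 := by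
            simp [List.getD, List.getElem?_set_ne hne]
          rw [if_neg (fun h => hj1 h.1), hset, if_neg (fun h => hj h.1)]

lemma pv_colsUpd_getD (rs : List (List Int)) :
    ∀ (r : Nat) (CH : List Int) (c : Nat),
    (∀ row ∈ rs, ∀ k, (hk : k < row.length) → row[k] ≠ 0 → k < CH.length) →
    (pvColsUpd rs r CH).getD c 0 =
      pvRowAcc (rs.map (fun row => row.getD c 0)) r (CH.getD c 0) := by
  induction rs with
  | nil => intro r CH c _; simp [pvColsUpd, pvRowAcc]
  | cons row rs ih =>
    intro r CH c hPre
    rw [show pvColsUpd (row :: rs) r CH = pvColsUpd rs (r+1) (pvColUpd row r 0 CH) from rfl]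
    rw [ih (r+1) _ c (fun row' hm k hk hne => by
      rw [pv_colUpd_length]
      exact hPre row' (by simp [hm]) k hk hne)]
    rw [pv_colUpd_getD r row 0 CH c (fun k hk hne => by
      simpa using hPre row (by simp) k hk hne)]
    simp only [List.map_cons, pvRowAcc, Nat.sub_zero, Nat.zero_le, true_and]

lemma pv_lineHint_rowAcc (line : List Int) :
    ∀ (s : Nat) (h : Int),
    (PySem.List.enumerate line (s : Int)).foldl
      (fun h p => if p.2 ≠ 0 then (if h = -1 then p.1 else p.1 - h - 1) else h) h =
      pvRowAcc line s h := by
  induction line with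
  | nil => intro s h; simp [PySem.List.enumerate_nil, pvRowAcc]
  | cons e line ih =>
    intro s h
    rw [PySem.List.enumerate_cons]
    have hc : ((s : Int) + 1) = ((s + 1 : Nat) : Int) := by push_cast; ring
    simp only [List.foldl_cons, pvRowAcc, hc, ih, pvHintFold]

lemma pv_lineHint_eq (line : List Int) : pvLineHint line = pvRowAcc line 0 (-1) := by
  have h := pv_lineHint_rowAcc line 0 (-1)
  simpa [pvLineHint] using h

lemma pv_main (sol : List (List Int))
    (hPre : ∀ row ∈ sol, ∀ k, (hk : k < row.length) → row[k] ≠ 0 → k < sol.length) :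
    get_full_hints sol = get_full_hints_alt sol := by
  set n := sol.length with hn
  have hlen : (PySem.List.pyRange 0 (2 * (n : Int)) 1).length = 2 * n := by
    have h2 : (2 * (n : Int)) = ((2 * n : Nat) : Int) := by push_cast; ring
    rw [h2, PySem.List.pyRange_zero_natCast]
    simp
  have hinit : (PySem.List.pyRange 0 (2 * (n : Int)) 1).foldl (fun h _ => h ++ [(-1 : Int)]) []
      = List.replicate n (-1) ++ List.replicate n (-1) := by
    rw [pv_init_fold, hlen, List.nil_append, two_mul, List.replicate_add]
  have hRH : (List.replicate n (-1 : Int)).length = n := by simp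
  have hout := pv_outer n sol 0 (List.replicate n (-1)) (List.replicate n (-1)) hRH hRH
    (by omega) (fun j _ hj => by simp [List.getD, List.getElem?_replicate, hj])
    (fun row hm k hk hne => hPre row hm k hk hne)
  have h00 : (((0 : Nat)) : Int) = 0 := by simp
  rw [h00] at hout
  have hA : get_full_hints sol
      = sol.map (fun row => pvRowAcc row 0 (-1)) ++ pvColsUpd sol 0 (List.replicate n (-1)) := by
    show (sol.foldl (pvAOuter (n : Int))
      ((PySem.List.pyRange 0 (2 * (n : Int)) 1).foldl (fun h _ => h ++ [(-1 : Int)]) [], 0)).1 = _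
    rw [hinit, hout]
    simp [hn]
  rw [hA]
  show _ = sol.map pvLineHint ++ _
  have hrows : sol.map pvLineHint = sol.map (fun row => pvRowAcc row 0 (-1)) := by
    apply List.map_congr_left
    intro row _
    exact pv_lineHint_eq row
  rw [hrows]
  congr 1
  -- columns
  have hlenn : (PySem.List.pyRange 0 ((n : Nat) : Int) 1).length = n := by
    rw [PySem.List.pyRange_zero_natCast]; simp
  apply List.ext_getElem?
  intro c
  by_cases hcn : c < n
  · have hc1 : c < (pvColsUpd sol 0 (List.replicate n (-1 : Int))).length := by
      rw [pv_colsUpd_length]; simpa using hcn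
    have hgetA : (pvColsUpd sol 0 (List.replicate n (-1 : Int)))[c]
        = pvRowAcc (sol.map (fun row => row.getD c 0)) 0 (-1) := by
      have h3 := pv_colsUpd_getD sol 0 (List.replicate n (-1 : Int)) c
        (fun row hm k hk hne => by simpa using hPre row hm k hk hne)
      rw [List.getD_eq_getElem _ 0 hc1] at h3
      rw [h3]
      simp [List.getD, List.getElem?_replicate, hcn]
    rw [List.getElem?_eq_getElem hc1, hgetA]
    rw [List.getElem?_map, PySem.List.getElem?_map_pyRange_zero _ _ _ (by simpa using hcn)]
    simp only [Option.map_some]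
    congr 1
    have hcol : sol.map (fun row =>
        if ((c : Int)) < (row.length : Int) then PySem.List.pyGetD row ((c : Int)) 0 else 0)
        = sol.map (fun row => row.getD c 0) := by
      apply List.map_congr_left
      intro row _
      by_cases h : (c : Int) < (row.length : Int)
      · simp [h]
      · have hle : row.length ≤ c := by exact_mod_cast not_lt.mp h
        rw [if_neg h, List.getD_eq_default _ _ (by omega)]
    rw [hcol, pv_lineHint_eq]
  · rw [List.getElem?_eq_none, List.getElem?_eq_none]
    · simp only [List.length_map]
      show (PySem.List.pyRange 0 ((n : Nat) : Int) 1).length ≤ c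
      rw [hlenn]
      omega
    · rw [pv_colsUpd_length]
      simpa using not_lt.mp hcn

lemma pv_pre_cells (sol : List (List Int)) (hpre : Pre_get_full_hints sol) :
    ∀ row ∈ sol, ∀ k, (hk : k < row.length) → row[k] ≠ 0 → k < sol.length := by
  intro row hrow k hk hne
  by_contra hge
  push Not at hge
  unfold Pre_get_full_hints at hpre
  rw [List.all_eq_true] at hpre
  have h2 := hpre row hrow
  rw [List.all_eq_true] at h2
  have hmem : row[k] ∈ row.drop sol.length := by
    have : k - sol.length < (row.drop sol.length).length := by
      simp [List.length_drop]; omega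
    have hm := List.getElem_mem this
    rw [List.getElem_drop] at hm
    have he : sol.length + (k - sol.length) = k := by omega
    simpa [he] using hm
  have := h2 _ hmem
  simp at this
  exact hne this

-- ===== VERDICT (by name: the statement is the Claim_ definition above) =====
theorem get_full_hints_spec : Claim_equal_get_full_hints := by
  intro sol _ hP
  unfold Spec_get_full_hints
  exact pv_main sol (pv_pre_cells sol hP)
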